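-- pv_equiv track=rewrite | github.com/AurelBleuz/oc-formation | p9/src/process/stage_pca.py | cluster_transmap
-- ===== SOURCE A (Python) =====
-- def cluster_transmap(kmeans_cluster, dendrogram_cluster):
--     """
--     Map k-means clusters to dendrogram clusters based on minimum differences.
--
--     Parameters:
--     - kmeans_cluster (dict): Dictionary mapping k-means clusters to indices.
--     - dendrogram_cluster (dict): Dictionary mapping dendrogram clusters to indices.
--
--     Returns:
--     dict: Remapped k-means clusters.
--     """
--     kmeans_remap = {}
--     # Iterate over k-means clusters
--     for kmeans_key, kmeans_value in kmeans_cluster.items():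
--         # Find dendrogram cluster with minimum different elements
--         dendrogram_key, dendrogram_value = min(
--             dendrogram_cluster.items(),
--             key=lambda x: len(set(kmeans_value).symmetric_difference(x[1]))
--         )
--         # Update mapping
--         kmeans_remap.update({dendrogram_key: kmeans_value})
--     return kmeans_remap
-- ===== SOURCE B (Python) =====
-- def cluster_transmap(kmeans_cluster, dendrogram_cluster):
--     """Inverted-index re-implementation: |A ^ B| = |A|+|B|-2|A&B|, with
--     intersection sizes obtained from an element->clusters index instead of
--     building a symmetric difference per (kmeans, dendrogram) pair."""
--     dsets = {dk: set(dv) for dk, dv in dendrogram_cluster.items()}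
--     index = {}
--     for dk, ds in dsets.items():
--         for e in ds:
--             index.setdefault(e, []).append(dk)
--     kmeans_remap = {}
--     for kmeans_value in kmeans_cluster.values():
--         ks = set(kmeans_value)
--         inter = dict.fromkeys(dsets, 0)
--         for e in ks:
--             for dk in index.get(e, ()):
--                 inter[dk] += 1
--         best = min(dsets, key=lambda dk: len(ks) + len(dsets[dk]) - 2 * inter[dk])
--         kmeans_remap[best] = kmeans_value
--     return kmeans_remap
-- ===== Notes on version B (the rewrite author's own statement) =====
-- stated objective: faster
-- what changed: B precomputes the dendrogram sets and an element-to-cluster inverted index once, then scores each kmeans cluster with |K|+|D|-2|K∩D| using intersection counts gathered from the index, instead of materialising a symmetric-difference set for every (kmeans, dendrogram) pair as A does.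
import Mathlib
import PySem

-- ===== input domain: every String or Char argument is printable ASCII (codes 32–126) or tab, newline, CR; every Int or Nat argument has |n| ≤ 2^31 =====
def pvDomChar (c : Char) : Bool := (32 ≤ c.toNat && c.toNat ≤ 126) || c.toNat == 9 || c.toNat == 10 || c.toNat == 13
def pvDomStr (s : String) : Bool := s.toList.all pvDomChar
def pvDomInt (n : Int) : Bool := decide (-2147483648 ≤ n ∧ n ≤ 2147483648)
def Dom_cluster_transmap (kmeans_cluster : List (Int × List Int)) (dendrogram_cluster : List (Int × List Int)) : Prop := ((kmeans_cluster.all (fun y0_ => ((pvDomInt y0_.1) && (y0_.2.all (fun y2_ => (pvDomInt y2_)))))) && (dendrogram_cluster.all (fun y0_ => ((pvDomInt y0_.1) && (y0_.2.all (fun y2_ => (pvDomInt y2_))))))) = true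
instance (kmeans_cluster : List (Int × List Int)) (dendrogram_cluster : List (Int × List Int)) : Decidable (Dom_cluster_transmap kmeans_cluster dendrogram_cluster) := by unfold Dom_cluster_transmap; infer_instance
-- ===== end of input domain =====

-- B replaces the per-(kmeans,dendrogram)-pair symmetric-difference construction by an
-- element→cluster inverted index and the identity |X^Y| = |X|+|Y|-2|X∩Y| (objective: faster).

-- ===== PORT A =====
-- A's 'min(dendrogram_cluster.items(), key=...)': first item minimizing
-- len(set(kmeans_value).symmetric_difference(dendro_value)); Python's
-- set.symmetric_difference treats its iterable argument as a set, hence Set.ofList x.2.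
-- The 'none' branch (empty dendrogram_cluster, where Python's min raises ValueError)
-- is excluded by Pre_cluster_transmap.
def cluster_transmap (kmeans_cluster : List (Int × List Int)) (dendrogram_cluster : List (Int × List Int)) : List (Int × List Int) :=
  (kmeans_cluster.foldl
    (fun (kmeans_remap : PySem.Dict Int (List Int)) kp =>
      match PySem.List.min? dendrogram_cluster
          (fun x => (((PySem.Set.ofList kp.2).symmDiff (PySem.Set.ofList x.2)).length : Int)) with
      | some d => kmeans_remap.insert d.1 kp.2
      | none => kmeans_remap)
    PySem.Dict.empty).items

-- ===== PORT B =====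
-- 'inter[dk] += 1' is ported as modify dk 0 (·+1): the key is always present
-- (index values are dendrogram keys, all seeded by dict.fromkeys), so the default is never used.
def cluster_transmap_alt (kmeans_cluster : List (Int × List Int)) (dendrogram_cluster : List (Int × List Int)) : List (Int × List Int) :=
  let dsets : PySem.Dict Int (List Int) :=
    dendrogram_cluster.foldl (fun d p => d.insert p.1 (PySem.Set.ofList p.2)) PySem.Dict.empty
  let index : PySem.Dict Int (List Int) :=
    dsets.items.foldl
      (fun ix p => p.2.foldl (fun ix e => ix.modify e [] (· ++ [p.1])) ix)
      PySem.Dict.empty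
  let kmeans_remap : PySem.Dict Int (List Int) :=
    kmeans_cluster.foldl
      (fun kmeans_remap kp =>
        let ks := PySem.Set.ofList kp.2
        let inter0 : PySem.Dict Int Int := dsets.keys.foldl (fun d k => d.insert k 0) PySem.Dict.empty
        let inter : PySem.Dict Int Int :=
          ks.foldl (fun d e => (index.getD e []).foldl (fun d dk => d.modify dk 0 (· + 1)) d) inter0
        match PySem.List.min? dsets.keys
            (fun dk => PySem.Set.len ks + ((dsets.getD dk []).length : Int) - 2 * inter.getD dk 0) with
        | some best => kmeans_remap.insert best kp.2
        | none => kmeans_remap)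
      PySem.Dict.empty
  kmeans_remap.items

-- ===== PRECONDITION & SPEC =====
-- Pre_ excludes (a) a non-empty kmeans_cluster with an empty dendrogram_cluster, where
-- Python's min raises ValueError in both A and B, and (b) association lists with duplicate
-- dendrogram keys, which do not represent any Python dict input (the argument is a dict).
def Pre_cluster_transmap (kmeans_cluster : List (Int × List Int)) (dendrogram_cluster : List (Int × List Int)) : Prop :=
  (dendrogram_cluster.map Prod.fst).Nodup ∧ (kmeans_cluster = [] ∨ dendrogram_cluster ≠ [])
instance (kmeans_cluster : List (Int × List Int)) (dendrogram_cluster : List (Int × List Int)) : Decidable (Pre_cluster_transmap kmeans_cluster dendrogram_cluster) := by unfold Pre_cluster_transmap; infer_instance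
def pvWitness_cluster_transmap : (List (Int × List Int)) × (List (Int × List Int)) :=
  ([(0, [1, 2, 5]), (1, [3])], [(7, [1, 2]), (8, [3, 4])])

def Spec_cluster_transmap (kmeans_cluster : List (Int × List Int)) (dendrogram_cluster : List (Int × List Int)) (out : List (Int × List Int)) : Prop := out = cluster_transmap_alt kmeans_cluster dendrogram_cluster
instance (kmeans_cluster : List (Int × List Int)) (dendrogram_cluster : List (Int × List Int)) (out : List (Int × List Int)) : Decidable (Spec_cluster_transmap kmeans_cluster dendrogram_cluster out) := by unfold Spec_cluster_transmap; infer_instance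

-- ===== CLAIM (what is proved, stated in full; the proofs are below) =====
def Claim_equal_cluster_transmap : Prop := ∀ (kmeans_cluster : List (Int × List Int)) (dendrogram_cluster : List (Int × List Int)), Dom_cluster_transmap kmeans_cluster dendrogram_cluster → Pre_cluster_transmap kmeans_cluster dendrogram_cluster → Spec_cluster_transmap kmeans_cluster dendrogram_cluster (cluster_transmap kmeans_cluster dendrogram_cluster)

-- ===== LEMMAS AND PROOFS =====


-- L1: min? over a mapped list with pointwise-equal keys
theorem pv_minfold_aux {α β : Type} (kA : α → Int) (kB : β → Int) (f : α → β)
    (l : List α) :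
    ∀ (a : Option α), (∀ p ∈ l, kB (f p) = kA p) → (∀ m, a = some m → kB (f m) = kA m) →
    l.foldl (fun acc x => match acc with
      | none => some (f x)
      | some m => if kB (f x) < kB m then some (f x) else some m) (Option.map f a)
      = Option.map f (l.foldl (fun acc x => match acc with
      | none => some x
      | some m => if kA x < kA m then some x else some m) a) := by
  induction l with
  | nil => intro a _ _; simp
  | cons x t ih =>
    intro a hl hacc
    cases a with
    | none =>
      simp only [List.foldl_cons, Option.map_none]
      exact ih (some x) (fun p hp => hl p (List.mem_cons_of_mem _ hp))
        (fun m hm => by cases hm; exact hl x (List.mem_cons_self))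
    | some m =>
      simp only [List.foldl_cons, Option.map_some]
      rw [hacc m rfl, hl x List.mem_cons_self]
      by_cases hc : kA x < kA m
      · simp only [if_pos hc]
        exact ih (some x) (fun p hp => hl p (List.mem_cons_of_mem _ hp))
          (fun m' hm' => by cases hm'; exact hl x List.mem_cons_self)
      · simp only [if_neg hc]
        exact ih (some m) (fun p hp => hl p (List.mem_cons_of_mem _ hp)) hacc

theorem pv_min?_map_key_eq {α β : Type} (l : List α) (f : α → β) (kA : α → Int) (kB : β → Int)
    (h : ∀ p ∈ l, kB (f p) = kA p) :
    PySem.List.min? (l.map f) kB = Option.map f (PySem.List.min? l kA) := by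
  unfold PySem.List.min?
  rw [List.foldl_map]
  exact pv_minfold_aux kA kB f l none h (by intro m hm; cases hm)

-- L2: seeding dict.fromkeys(_, 0) gives 0 everywhere
theorem pv_inter0_getD (l : List Int) : ∀ (d : PySem.Dict Int Int) (k : Int), d.getD k 0 = 0 →
    (l.foldl (fun d k' => d.insert k' 0) d).getD k 0 = 0 := by
  induction l with
  | nil => intro d k h; simpa using h
  | cons x t ih =>
    intro d k h
    simp only [List.foldl_cons]
    exact ih _ k (by rw [PySem.Dict.getD_insert]; split <;> simp [h])

-- L3: filter/map shape of the pairs fed to the index for one cluster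
theorem pv_repl (l : List Int) (a e : Int) :
    ((l.map (fun x => (x, a))).filter (fun q => q.1 == e)).map (fun q => q.2)
      = List.replicate (l.count e) a := by
  induction l with
  | nil => simp
  | cons x t ih =>
    simp only [List.map_cons, List.filter_cons, List.count_cons]
    by_cases hx : x = e
    · subst hx; simp [ih, List.replicate_succ]
    · simp [hx, ih, Ne.symm]

-- L4: inner index loop for one dendrogram cluster
theorem pv_inner_getD (s : List Int) (a : Int) (ix : PySem.Dict Int (List Int)) (e : Int) :
    (s.foldl (fun ix e' => ix.modify e' [] (· ++ [a])) ix).getD e []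
      = ix.getD e [] ++ List.replicate (s.count e) a := by
  have h1 : s.foldl (fun ix e' => ix.modify e' [] (· ++ [a])) ix
      = (s.map (fun x => (x, a))).foldl (fun d p => d.modify p.1 [] (· ++ [p.2])) ix := by
    rw [List.foldl_map]
  rw [h1, PySem.Dict.getD_foldl_modify_append, pv_repl]

-- L5: the whole inverted index, per element
theorem pv_idx_getD (its : List (Int × List Int)) :
    ∀ (d : PySem.Dict Int (List Int)) (e : Int),
    (its.foldl (fun ix p => p.2.foldl (fun ix e' => ix.modify e' [] (· ++ [p.1])) ix) d).getD e []
      = d.getD e [] ++ its.flatMap (fun p => List.replicate (p.2.count e) p.1) := by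
  induction its with
  | nil => intro d e; simp
  | cons p t ih =>
    intro d e
    simp only [List.foldl_cons, List.flatMap_cons]
    rw [ih, pv_inner_getD, List.append_assoc]

-- L6a: a key absent from the tail contributes nothing
theorem pv_count_flatMap_zero (t : List (Int × List Int)) (k e : Int)
    (h : k ∉ t.map Prod.fst) :
    (t.flatMap (fun p => List.replicate ((PySem.Set.ofList p.2).count e) p.1)).count k = 0 := by
  induction t with
  | nil => simp
  | cons p s ih =>
    simp only [List.map_cons, List.mem_cons, not_or] at h
    simp only [List.flatMap_cons, List.count_append, List.count_replicate]
    rw [ih h.2]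
    simp [Ne.symm h.1]

-- L6: how often a given dendrogram key occurs in the index entry of element e
theorem pv_count_flatMap (dd : List (Int × List Int)) (p0 : Int × List Int) (e : Int)
    (hnd : (dd.map Prod.fst).Nodup) (hp : p0 ∈ dd) :
    (dd.flatMap (fun p => List.replicate ((PySem.Set.ofList p.2).count e) p.1)).count p0.1
      = if e ∈ PySem.Set.ofList p0.2 then 1 else 0 := by
  induction dd with
  | nil => cases hp
  | cons p t ih =>
    simp only [List.map_cons, List.nodup_cons] at hnd
    simp only [List.flatMap_cons, List.count_append, List.count_replicate]
    rcases List.mem_cons.mp hp with h0 | h0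
    · subst h0
      rw [pv_count_flatMap_zero t p0.1 e hnd.1]
      simp only [beq_self_eq_true, if_true, add_zero]
      by_cases he : e ∈ PySem.Set.ofList p0.2
      · rw [List.count_eq_one_of_mem (PySem.Set.nodup_ofList _) he, if_pos he]
      · rw [List.count_eq_zero_of_not_mem he, if_neg he]
    · have hne : p.1 ≠ p0.1 := fun hk => hnd.1 (by rw [hk]; exact List.mem_map_of_mem h0)
      rw [ih hnd.2 h0]
      simp [hne]

-- L7: the intersection-count accumulator
theorem pv_inter_getD (ks : List Int) (ix : PySem.Dict Int (List Int)) :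
    ∀ (d : PySem.Dict Int Int) (k : Int),
    (ks.foldl (fun d e => (ix.getD e []).foldl (fun d dk => d.modify dk 0 (· + 1)) d) d).getD k 0
      = d.getD k 0 + (ks.map (fun e => (((ix.getD e []).count k : Int)))).sum := by
  induction ks with
  | nil => intro d k; simp
  | cons e t ih =>
    intro d k
    simp only [List.foldl_cons, List.map_cons, List.sum_cons]
    rw [ih, PySem.Dict.getD_foldl_modify_add_one]
    ring

-- L8: |ks ∩ SD| is symmetric (both lists duplicate-free)
theorem pv_countP_mem_comm (s t : List Int) (hs : s.Nodup) (ht : t.Nodup) :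
    s.countP (fun x => t.contains x) = t.countP (fun x => s.contains x) := by
  rw [List.countP_eq_length_filter, List.countP_eq_length_filter]
  exact List.Perm.length_eq (by
    rw [List.perm_ext_iff_of_nodup (hs.filter _) (ht.filter _)]
    intro a
    simp [List.mem_filter, and_comm])

-- L9: |ks ^ SD| = |ks| + |SD| - 2|ks ∩ SD|
theorem pv_symmdiff_len (ks SD : List Int) (hk : ks.Nodup) (hd : SD.Nodup) :
    ((PySem.Set.symmDiff ks SD).length : Int)
      = (ks.length : Int) + (SD.length : Int)
        - 2 * (ks.countP (fun e => PySem.Set.contains SD e) : Int) := by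
  unfold PySem.Set.symmDiff PySem.Set.diff PySem.Set.contains
  rw [List.length_append]
  have h1 := List.length_eq_length_filter_add (l := ks) (fun x => SD.contains x)
  have h2 := List.length_eq_length_filter_add (l := SD) (fun x => ks.contains x)
  have h3 := pv_countP_mem_comm ks SD hk hd
  simp only [← List.countP_eq_length_filter] at h1 h2 ⊢
  push_cast
  omega

-- the dendrogram-sets dict, as items / keys / lookups
theorem pv_dsets_items (dd : List (Int × List Int)) (hnd : (dd.map Prod.fst).Nodup) :
    (dd.foldl (fun d p => d.insert p.1 (PySem.Set.ofList p.2)) PySem.Dict.empty).items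
      = dd.map (fun p => (p.1, PySem.Set.ofList p.2)) := by
  rw [PySem.Dict.items_foldl_insert_fresh dd Prod.fst (fun p => PySem.Set.ofList p.2)
    PySem.Dict.empty (by simp) hnd]
  rfl

theorem pv_dsets_keys (dd : List (Int × List Int)) (hnd : (dd.map Prod.fst).Nodup) :
    (dd.foldl (fun d p => d.insert p.1 (PySem.Set.ofList p.2)) PySem.Dict.empty).keys
      = dd.map Prod.fst := by
  simp only [PySem.Dict.keys, pv_dsets_items dd hnd, List.map_map]
  rfl

theorem pv_dsets_getD (dd : List (Int × List Int)) (hnd : (dd.map Prod.fst).Nodup)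
    (p : Int × List Int) (hp : p ∈ dd) :
    (dd.foldl (fun d q => d.insert q.1 (PySem.Set.ofList q.2)) PySem.Dict.empty).getD p.1 []
      = PySem.Set.ofList p.2 := by
  apply PySem.Dict.getD_of_mem_items
  · rw [pv_dsets_items dd hnd]
    exact List.mem_map_of_mem hp
  · rw [PySem.Dict.keys, pv_dsets_items dd hnd, List.map_map]
    exact hnd

-- the index entry of element e, counted at dendrogram key p.1
theorem pv_index_count (dd : List (Int × List Int)) (hnd : (dd.map Prod.fst).Nodup)
    (p : Int × List Int) (hp : p ∈ dd) (e : Int) :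
    ((((dd.foldl (fun d q => d.insert q.1 (PySem.Set.ofList q.2)) PySem.Dict.empty).items.foldl
          (fun ix q => q.2.foldl (fun ix e' => ix.modify e' [] (· ++ [q.1])) ix)
          PySem.Dict.empty).getD e []).count p.1 : Int)
      = if (PySem.Set.ofList p.2).contains e = true then 1 else 0 := by
  rw [pv_idx_getD, pv_dsets_items dd hnd, List.flatMap_map]
  simp only [PySem.Dict.getD_empty, List.nil_append]
  rw [pv_count_flatMap dd p e hnd hp]
  by_cases he : e ∈ PySem.Set.ofList p.2
  · rw [if_pos he, if_pos ((PySem.Set.contains_iff _ _).mpr he)]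
    exact Nat.cast_one
  · rw [if_neg he, if_neg (by simpa [PySem.Set.contains_iff] using he)]
    exact Nat.cast_zero

-- the intersection counter, for any index whose entries count correctly
theorem pv_inter_val (ks : List Int) (ix : PySem.Dict Int (List Int))
    (d0 : PySem.Dict Int Int) (k : Int) (S : PySem.Set Int)
    (h0 : d0.getD k 0 = 0)
    (hcnt : ∀ e, ((ix.getD e []).count k : Int) = if S.contains e = true then 1 else 0) :
    (ks.foldl (fun d e => (ix.getD e []).foldl (fun d dk => d.modify dk 0 (· + 1)) d) d0).getD k 0
      = (ks.countP (fun e => S.contains e) : Int) := by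
  rw [pv_inter_getD, h0, List.map_congr_left (fun e _ => hcnt e),
    PySem.List.sum_map_ite_one_zero]
  exact zero_add _

-- main equivalence, dendrogram keys duplicate-free
theorem pv_main (km dd : List (Int × List Int)) (hnd : (dd.map Prod.fst).Nodup) :
    cluster_transmap km dd = cluster_transmap_alt km dd := by
  unfold cluster_transmap cluster_transmap_alt
  simp only []
  apply congrArg PySem.Dict.items
  apply PySem.List.foldl_congr_mem
  intro acc kp _
  rw [pv_dsets_keys dd hnd]
  rw [pv_min?_map_key_eq dd Prod.fst
    (fun x => (((PySem.Set.ofList kp.2).symmDiff (PySem.Set.ofList x.2)).length : Int)) _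
    (by
      intro p hp
      beta_reduce
      rw [pv_dsets_getD dd hnd p hp,
        pv_inter_val (PySem.Set.ofList kp.2) _ _ p.1 (PySem.Set.ofList p.2)
          (pv_inter0_getD _ _ _ (by simp)) (fun e => pv_index_count dd hnd p hp e),
        pv_symmdiff_len (PySem.Set.ofList kp.2) (PySem.Set.ofList p.2)
          (PySem.Set.nodup_ofList _) (PySem.Set.nodup_ofList _)]
      simp [PySem.Set.len])]
  cases PySem.List.min? dd
    (fun x => (((PySem.Set.ofList kp.2).symmDiff (PySem.Set.ofList x.2)).length : Int)) <;> rfl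

-- ===== VERDICT (by name: the statement is the Claim_ definition above) =====
theorem cluster_transmap_spec : Claim_equal_cluster_transmap := by
  intro km dd _ hpre
  unfold Spec_cluster_transmap
  exact pv_main km dd hpre.1
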